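-- pv_equiv track=rewrite | github.com/mijung-oh/Algo_python | Algo_baekjoon/나머지/5397_키로거2.py | keyLogger
-- ===== SOURCE A (Python) =====
-- def keyLogger(key):
--     pointer = 0
--     left = []
--     right = []
--     result = ""
--     for k in key:
--         if k == "<":
--             # 왼쪽 스택 값을 오른쪽 스택으로 넣는다.
--             if left:
--                 right.append(left.pop())
--         elif k == ">":
--             if right:
--                 left.append(right.pop())
--         elif k == "-":
--             if left:
--                 left.pop()
--         else:
--             # 기본 문자일 경우 left에 값을 넣는다.
--             left.append(k)
--
--     # for i in left:
--     #     result += i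
--     # for j in range(len(right)-1, -1, -1):
--     #     result += right[j]
--
--     while right:
--         left.append(right.pop())
--     return left
-- ===== SOURCE B (Python) =====
-- def keyLogger(key):
--     buf = []
--     cursor = 0
--     for k in key:
--         if k == "<":
--             if cursor > 0:
--                 cursor -= 1
--         elif k == ">":
--             if cursor < len(buf):
--                 cursor += 1
--         elif k == "-":
--             if cursor > 0:
--                 del buf[cursor - 1]
--                 cursor -= 1
--         else:
--             buf.insert(cursor, k)
--             cursor += 1
--     return buf
-- ===== Notes on version B (the rewrite author's own statement) =====
-- stated objective: idiomatic
-- what changed: Replaces the two-stack left/right split (with a final while-loop draining the right stack) by a single buffer list edited in place at an integer cursor position.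
import Mathlib
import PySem

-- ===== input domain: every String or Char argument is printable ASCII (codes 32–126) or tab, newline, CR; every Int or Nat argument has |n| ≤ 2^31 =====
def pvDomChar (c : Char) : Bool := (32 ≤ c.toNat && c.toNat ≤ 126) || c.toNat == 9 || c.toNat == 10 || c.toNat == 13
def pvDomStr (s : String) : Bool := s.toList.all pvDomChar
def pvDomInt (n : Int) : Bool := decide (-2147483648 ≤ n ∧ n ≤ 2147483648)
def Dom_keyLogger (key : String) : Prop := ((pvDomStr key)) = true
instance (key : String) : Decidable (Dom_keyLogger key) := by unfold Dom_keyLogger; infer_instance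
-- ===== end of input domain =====

-- B replaces A's two-stack (left/right) simulation by a single buffer list edited at a
-- cursor position (idiomatic; same behaviour).

-- ===== PORT A =====
-- one loop iteration of A: state = (left, right); '.pop()' on a guarded-nonempty list is
-- getLast? (the popped value) + dropLast (the remaining list), '.append' is '++ [·]'
def pvStepA (s : List String × List String) (k : Char) : List String × List String :=
  if k = '<' then
    match s.1.getLast? with
    | some x => (s.1.dropLast, s.2 ++ [x])
    | none => s
  else if k = '>' then
    match s.2.getLast? with
    | some x => (s.1 ++ [x], s.2.dropLast)
    | none => s
  else if k = '-' then
    if s.1 = [] then s else (s.1.dropLast, s.2)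
  else (s.1 ++ [k.toString], s.2)

def keyLogger (key : String) : List String :=
  let s := key.toList.foldl pvStepA ([], [])
  -- 'while right: left.append(right.pop())' appends right's elements back-to-front
  s.1 ++ s.2.reverse

-- ===== PORT B =====
-- one loop iteration of B: state = (buf, cursor); the Python cursor is always ≥ 0, modelled as Nat
def pvStepB (s : List String × Nat) (k : Char) : List String × Nat :=
  if k = '<' then
    if 0 < s.2 then (s.1, s.2 - 1) else s
  else if k = '>' then
    if s.2 < s.1.length then (s.1, s.2 + 1) else s
  else if k = '-' then
    if 0 < s.2 then (s.1.eraseIdx (s.2 - 1), s.2 - 1) else s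
  else (PySem.List.insert s.1 (s.2 : Int) k.toString, s.2 + 1)

def keyLogger_alt (key : String) : List String :=
  (key.toList.foldl pvStepB ([], 0)).1

-- ===== PRECONDITION & SPEC =====
def Spec_keyLogger (key : String) (out : List String) : Prop := out = keyLogger_alt key
instance (key : String) (out : List String) : Decidable (Spec_keyLogger key out) := by unfold Spec_keyLogger; infer_instance

-- ===== CLAIM (what is proved, stated in full; the proofs are below) =====
def Claim_equal_keyLogger : Prop := ∀ (key : String), Dom_keyLogger key → Spec_keyLogger key (keyLogger key)

-- ===== LEMMAS AND PROOFS =====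

-- Invariant relating the two loop states: A's left stack is buf.take cur,
-- A's right stack is (buf.drop cur).reverse, and the cursor stays in range.
lemma pvStep_eq (k : Char) (buf : List String) (cur : Nat) (h : cur ≤ buf.length) :
    pvStepA (buf.take cur, (buf.drop cur).reverse) k
      = ((pvStepB (buf, cur) k).1.take (pvStepB (buf, cur) k).2,
         ((pvStepB (buf, cur) k).1.drop (pvStepB (buf, cur) k).2).reverse)
    ∧ (pvStepB (buf, cur) k).2 ≤ (pvStepB (buf, cur) k).1.length := by
  by_cases hk1 : k = '<'
  · subst hk1
    by_cases hc : 0 < cur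
    · obtain ⟨m, rfl⟩ : ∃ m, cur = m + 1 := ⟨cur - 1, by omega⟩
      have hm : m < buf.length := by omega
      have ht : buf.take (m + 1) = buf.take m ++ [buf[m]] := by
        rw [List.take_add_one]; simp [List.getElem?_eq_getElem hm]
      have hg : (buf.take (m + 1)).getLast? = some buf[m] := by
        rw [ht]; exact List.getLast?_concat
      have hdl : (buf.take (m + 1)).dropLast = buf.take m := by
        rw [ht]; exact List.dropLast_concat
      have hd : (buf.drop m).reverse = (buf.drop (m + 1)).reverse ++ [buf[m]] := by
        rw [List.drop_eq_getElem_cons hm, List.reverse_cons]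
      refine ⟨?_, by simp [pvStepB]; omega⟩
      simp [pvStepA, pvStepB, hg, hdl, hd]
    · obtain rfl : cur = 0 := by omega
      exact ⟨by simp [pvStepA, pvStepB], by simp [pvStepB]⟩
  · by_cases hk2 : k = '>'
    · subst hk2
      by_cases hc : cur < buf.length
      · have hd : (buf.drop cur).reverse = (buf.drop (cur + 1)).reverse ++ [buf[cur]] := by
          rw [List.drop_eq_getElem_cons hc, List.reverse_cons]
        have hg : ((buf.drop cur).reverse).getLast? = some buf[cur] := by
          rw [hd]; exact List.getLast?_concat
        have hdl : ((buf.drop cur).reverse).dropLast = (buf.drop (cur + 1)).reverse := by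
          rw [hd]; exact List.dropLast_concat
        have ht : buf.take (cur + 1) = buf.take cur ++ [buf[cur]] := by
          rw [List.take_add_one]; simp [List.getElem?_eq_getElem hc]
        refine ⟨?_, by simp [pvStepB, hc]⟩
        refine Prod.ext (by simp [pvStepA, pvStepB, hc, hg]) (by simp [pvStepA, pvStepB, hc, hg, hdl])
      · have hcl : cur = buf.length := by omega
        refine ⟨by simp [pvStepA, pvStepB, hcl], by simp [pvStepB, hcl]⟩
    · by_cases hk3 : k = '-'
      · subst hk3
        by_cases hc : 0 < cur
        · obtain ⟨m, rfl⟩ : ∃ m, cur = m + 1 := ⟨cur - 1, by omega⟩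
          have hm : m < buf.length := by omega
          have hlen : (buf.take m).length = m := by simp; omega
          have ht : buf.take (m + 1) = buf.take m ++ [buf[m]] := by
            rw [List.take_add_one]; simp [List.getElem?_eq_getElem hm]
          have hne : buf.take (m + 1) ≠ [] := by
            intro hnil; rw [ht] at hnil; simp at hnil; simp [hnil] at hm
          have hdl : (buf.take (m + 1)).dropLast = buf.take m := by
            rw [ht]; exact List.dropLast_concat
          have he : buf.eraseIdx m = buf.take m ++ buf.drop (m + 1) :=
            List.eraseIdx_eq_take_drop_succ buf m
          have h1 : (buf.eraseIdx m).take m = buf.take m := by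
            rw [he]; exact List.take_left' hlen
          have h2 : (buf.eraseIdx m).drop m = buf.drop (m + 1) := by
            rw [he]; exact List.drop_left' hlen
          refine ⟨?_, by simp [List.length_eraseIdx, pvStepB, hm]; omega⟩
          simp [pvStepA, pvStepB, hne, hdl, h1, h2]
        · obtain rfl : cur = 0 := by omega
          exact ⟨by simp [pvStepA, pvStepB], by simp [pvStepB]⟩
      · have hins : PySem.List.insert buf (cur : Int) (String.singleton k)
            = buf.take cur ++ String.singleton k :: buf.drop cur :=
          PySem.List.insert_natCast buf cur _ h
        have hlen : (buf.take cur ++ [String.singleton k]).length = cur + 1 := by simp; omega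
        have h1 := List.take_left' (l₂ := buf.drop cur) hlen
        have h2 := List.drop_left' (l₂ := buf.drop cur) hlen
        rw [List.append_assoc, List.singleton_append] at h1 h2
        refine ⟨?_, ?_⟩
        · simp [pvStepA, pvStepB, hk1, hk2, hk3, hins, h1, h2]
        · simp [pvStepB, hk1, hk2, hk3, hins]; omega

lemma pvFold_eq (ks : List Char) (buf : List String) (cur : Nat) (h : cur ≤ buf.length) :
    ks.foldl pvStepA (buf.take cur, (buf.drop cur).reverse)
      = ((ks.foldl pvStepB (buf, cur)).1.take (ks.foldl pvStepB (buf, cur)).2,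
         ((ks.foldl pvStepB (buf, cur)).1.drop (ks.foldl pvStepB (buf, cur)).2).reverse)
    ∧ (ks.foldl pvStepB (buf, cur)).2 ≤ (ks.foldl pvStepB (buf, cur)).1.length := by
  induction ks generalizing buf cur with
  | nil => exact ⟨rfl, h⟩
  | cons k ks ih =>
    obtain ⟨h1, h2⟩ := pvStep_eq k buf cur h
    simpa [List.foldl_cons, h1] using ih (pvStepB (buf, cur) k).1 (pvStepB (buf, cur) k).2 h2

-- ===== VERDICT (by name: the statement is the Claim_ definition above) =====
theorem keyLogger_spec : Claim_equal_keyLogger := by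
  intro key _
  show _ = _
  have := (pvFold_eq key.toList [] 0 (by simp)).1
  simp only [List.take_nil, List.drop_nil, List.reverse_nil] at this
  simp [keyLogger, keyLogger_alt, this]
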